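-- pv_equiv track=rewrite | github.com/mdecelle/advent-of-code | puzzle_11/part_2.py | traverse_route
-- ===== SOURCE A (Python) =====
-- def calc_paths_to_destination(start_server, destination_server, servers, paths_to_out):
--   if paths_to_out[start_server] == None:
--     paths_to_out[start_server] = sum([calc_paths_to_destination(server, destination_server, servers, paths_to_out) for server in servers[start_server]])
--   return paths_to_out[start_server]
--
-- def clear_paths(paths_to_out):
--   for p in paths_to_out:
--     if paths_to_out[p] != None:
--       paths_to_out[p] = 0
--
-- def traverse_route(route, servers):
--   paths_to_out = {server: None for server in servers}
--   path_count = 1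
--   for i in range(len(route)-1,0,-1):
--     paths_to_out[route[i]] = path_count
--     path_count = calc_paths_to_destination(route[i-1], route[i], servers, paths_to_out)
--     clear_paths(paths_to_out)
--   return path_count
-- ===== SOURCE B (Python) =====
-- def count_paths(start, servers, memo):
--   stack = [start]
--   while stack:
--     node = stack[-1]
--     if memo[node] is not None:
--       stack.pop()
--       continue
--     pending = [s for s in servers[node] if memo[s] is None]
--     if pending:
--       stack.extend(pending)
--     else:
--       memo[node] = sum(memo[s] for s in servers[node])
--       stack.pop()
--   return memo[start]
--
-- def traverse_route(route, servers):
--   memo = {server: None for server in servers}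
--   path_count = 1
--   for i in range(len(route) - 1, 0, -1):
--     memo[route[i]] = path_count
--     path_count = count_paths(route[i - 1], servers, memo)
--     for node, value in memo.items():
--       if value is not None:
--         memo[node] = 0
--   return path_count
-- ===== Notes on version B (the rewrite author's own statement) =====
-- stated objective: alternative
-- what changed: Replaces the recursive memoized calc_paths_to_destination by an iterative post-order traversal with an explicit stack: a node is reduced (its successors' counts summed into the memo) only once every unresolved successor has been popped and resolved, so the call stack disappears; the between-segment reset iterates over memo.items() in one pass.
import Mathlib
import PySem

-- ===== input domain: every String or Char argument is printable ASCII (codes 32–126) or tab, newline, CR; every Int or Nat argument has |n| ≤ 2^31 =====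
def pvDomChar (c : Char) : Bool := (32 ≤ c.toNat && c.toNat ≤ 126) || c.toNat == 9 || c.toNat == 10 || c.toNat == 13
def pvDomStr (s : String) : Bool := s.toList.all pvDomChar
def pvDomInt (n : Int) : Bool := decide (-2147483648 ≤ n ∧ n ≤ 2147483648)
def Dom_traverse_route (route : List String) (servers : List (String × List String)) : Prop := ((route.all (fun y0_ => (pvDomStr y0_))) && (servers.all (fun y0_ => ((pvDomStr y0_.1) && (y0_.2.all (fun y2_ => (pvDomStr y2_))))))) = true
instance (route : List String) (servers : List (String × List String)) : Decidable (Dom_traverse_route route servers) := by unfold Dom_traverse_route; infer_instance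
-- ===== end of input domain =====

-- B replaces A's recursive memoized descent by an iterative post-order traversal with an
-- explicit stack over the same memo dict (objective: alternative). Return values only:
-- A mutates its dict arguments internally, but traverse_route's caller observes no mutation.

-- ===== PORT A =====
-- calc_paths_to_destination; `fuel` only bounds the recursion depth (Python recurses without
-- bound on cycles reachable through fresh nodes; Pre_ excludes those inputs).
def pvCalc (sd : PySem.Dict String (List String)) :
    Nat → String → String → PySem.Dict String (Option Int) → Int × PySem.Dict String (Option Int)
  | 0, _, _, d => (0, d)
  | fuel + 1, start, dest, d =>
    match d.get? start with
    | none => (0, d)               -- Python: KeyError here (excluded by Pre_)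
    | some (some x) => (x, d)
    | some none =>
        -- sum([calc_...(server, …) for server in servers[start_server]]), left to right
        let p := (sd.getD start []).foldl (fun acc u =>
            let r := pvCalc sd fuel u dest acc.2
            (acc.1 + r.1, r.2)) ((0 : Int), d)
        (p.1, p.2.insert start (some p.1))

-- clear_paths: if paths_to_out[p] != None: paths_to_out[p] = 0
def pvClearStep (acc : PySem.Dict String (Option Int)) (p : String) :
    PySem.Dict String (Option Int) :=
  match acc.get? p with
  | some (some _) => acc.insert p (some 0)
  | _ => acc

def pvClear (d : PySem.Dict String (Option Int)) : PySem.Dict String (Option Int) :=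
  d.keys.foldl pvClearStep d

-- body of A's `for i in range(len(route)-1, 0, -1)` loop
def pvStepA (sd : PySem.Dict String (List String)) (route : List String) (fuel : Nat)
    (st : Int × PySem.Dict String (Option Int)) (i : Int) : Int × PySem.Dict String (Option Int) :=
  let d1 := st.2.insert (PySem.List.pyGetD route i "") (some st.1)
  let r := pvCalc sd fuel (PySem.List.pyGetD route (i - 1) "") (PySem.List.pyGetD route i "") d1
  (r.1, pvClear r.2)

def traverse_route (route : List String) (servers : List (String × List String)) : Int :=
  let sd := PySem.Dict.ofList servers
  let d0 := PySem.Dict.ofList (sd.keys.map (fun k => (k, (none : Option Int))))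
  ((PySem.List.pyRange ((route.length : Int) - 1) 0 (-1)).foldl
      (pvStepA sd route (servers.length + 1)) (1, d0)).1

-- ===== PORT B =====
-- memo[s], reading a resolved entry; Python raises KeyError on a missing key (excluded by Pre_)
def pvRead (d : PySem.Dict String (Option Int)) (s : String) : Int :=
  match d.get? s with
  | some (some x) => x
  | _ => 0

-- `memo[s] is None` (a missing key raises KeyError in Python; excluded by Pre_)
def pvUnres (d : PySem.Dict String (Option Int)) (s : String) : Bool :=
  d.get? s == some none

-- B's `while stack:` loop; the list head is the stack top, so Python's `stack.extend(pending)`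
-- is `pending.reverse ++ stack`; `fuel` only makes the loop total (Python loops without bound
-- on cycles reachable through fresh nodes; Pre_ excludes those inputs).
def pvRun (sd : PySem.Dict String (List String)) :
    Nat → List String → PySem.Dict String (Option Int) → PySem.Dict String (Option Int)
  | 0, _, d => d
  | _ + 1, [], d => d
  | fuel + 1, v :: rest, d =>
    if pvUnres d v = true then
      if (sd.getD v []).filter (fun s => pvUnres d s) = [] then
        pvRun sd fuel rest
          (d.insert v (some ((sd.getD v []).foldl (fun a s => a + pvRead d s) 0)))
      else
        pvRun sd fuel ((((sd.getD v []).filter (fun s => pvUnres d s)).reverse) ++ v :: rest) d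
    else
      pvRun sd fuel rest d

-- a fuel bound large enough for every terminating run (proved below); not part of B's Python
def pvC (sd : PySem.Dict String (List String)) : Nat :=
  (sd.items.map (fun p => p.2.length)).sum + 2

def pvFuel (sd : PySem.Dict String (List String)) (N : Nat) : Nat := (pvC sd) ^ (N + 1)

-- `for node, value in memo.items(): if value is not None: memo[node] = 0`
def pvClearB (d : PySem.Dict String (Option Int)) : PySem.Dict String (Option Int) :=
  d.items.foldl (fun acc p => if p.2.isSome then acc.insert p.1 (some 0) else acc) d

-- body of B's `for i in range(len(route)-1, 0, -1)` loop
def pvStepB (sd : PySem.Dict String (List String)) (route : List String) (N : Nat)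
    (st : Int × PySem.Dict String (Option Int)) (i : Int) : Int × PySem.Dict String (Option Int) :=
  let d1 := st.2.insert (PySem.List.pyGetD route i "") (some st.1)
  let d2 := pvRun sd (pvFuel sd N) [PySem.List.pyGetD route (i - 1) ""] d1
  (pvRead d2 (PySem.List.pyGetD route (i - 1) ""), pvClearB d2)

def traverse_route_alt (route : List String) (servers : List (String × List String)) : Int :=
  let sd := PySem.Dict.ofList servers
  let memo := PySem.Dict.ofList (sd.keys.map (fun k => (k, (none : Option Int))))
  ((PySem.List.pyRange ((route.length : Int) - 1) 0 (-1)).foldl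
      (pvStepB sd route (servers.length + 1)) (1, memo)).1

-- ===== PRECONDITION & SPEC =====
def pvSuccs (sd : PySem.Dict String (List String)) (v : String) : List String := sd.getD v []
-- one successor-expansion step that stops at the nodes in `avoid`
def pvExpand (sd : PySem.Dict String (List String)) (avoid : List String) (l : List String) :
    List String :=
  l.flatMap (fun v => if v ∈ avoid then [] else pvSuccs sd v)

-- When the loop runs, Pre_ requires, for each route segment (src = route[i-1], dst = route[i]):
-- repeated successor expansion from src, stopped at the route nodes route[i:] that A has already
-- cached at that point, dies out (otherwise A's recursion does not terminate — RecursionError),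
-- and every node that expansion meets is a key of `servers` or one of those cached route nodes
-- (otherwise A raises KeyError when it looks the node up).
def Pre_traverse_route (route : List String) (servers : List (String × List String)) : Prop :=
  route.length ≤ 1 ∨
  (∀ i ∈ List.range route.length, 1 ≤ i →
    ((pvExpand (PySem.Dict.ofList servers) (route.drop i))^[servers.length + 1]
        [route.getD (i - 1) ""] = [] ∧
     ∀ k ∈ List.range (servers.length + 2),
       ∀ x ∈ (pvExpand (PySem.Dict.ofList servers) (route.drop i))^[k] [route.getD (i - 1) ""],
         x ∈ (PySem.Dict.ofList servers).keys ∨ x ∈ route.drop i))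
instance (route : List String) (servers : List (String × List String)) :
    Decidable (Pre_traverse_route route servers) := by unfold Pre_traverse_route; infer_instance

def pvWitness_traverse_route : List String × (List (String × List String)) :=
  (["a", "b"], [("a", ["b"]), ("b", [])])

def Spec_traverse_route (route : List String) (servers : List (String × List String)) (out : Int) : Prop := out = traverse_route_alt route servers
instance (route : List String) (servers : List (String × List String)) (out : Int) : Decidable (Spec_traverse_route route servers out) := by unfold Spec_traverse_route; infer_instance

-- ===== CLAIM (what is proved, stated in full; the proofs are below) =====
def Claim_equal_traverse_route : Prop := ∀ (route : List String) (servers : List (String × List String)), Dom_traverse_route route servers → Pre_traverse_route route servers → Spec_traverse_route route servers (traverse_route route servers)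

-- ===== LEMMAS AND PROOFS =====

-- ---- graph notions used by the proofs ----

def pvDie (sd : PySem.Dict String (List String)) (S : List String) (k : Nat) (v : String) :
    Prop :=
  (pvExpand sd S)^[k] [v] = []

def pvLive (sd : PySem.Dict String (List String)) (dst : String) (zr : List String)
    (v : String) : Prop :=
  v ≠ dst ∧ v ∉ zr ∧ v ∈ sd.keys

-- the pure per-segment value A's memoisation and B's stack machine both compute
def pvVal (sd : PySem.Dict String (List String)) (dst : String) (pc : Int) (zr : List String) :
    Nat → String → Int
  | 0, _ => 0
  | k + 1, v =>
      if v = dst then pc else if v ∈ zr then 0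
      else ((pvSuccs sd v).map (pvVal sd dst pc zr k)).sum

-- reachability from v through live nodes (v itself live)
inductive pvRch (sd : PySem.Dict String (List String)) (dst : String) (zr : List String) :
    String → String → Prop
  | refl (v : String) : pvLive sd dst zr v → pvRch sd dst zr v v
  | step (v u w : String) : pvRch sd dst zr v u → w ∈ pvSuccs sd u →
      pvLive sd dst zr w → pvRch sd dst zr v w

-- the shape of the memo dict during one segment (W = nodes already written)
def pvDF (sd : PySem.Dict String (List String)) (dst : String) (pc : Int) (zr W : List String)
    (N : Nat) (x : String) : Option (Option Int) :=
  if x = dst then some (some pc) else if x ∈ zr then some (some 0)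
  else if x ∈ W then some (some (pvVal sd dst pc zr N x))
  else if x ∈ sd.keys then some none else none

-- the shape of the memo dict between segments (zr = nodes holding 0)
def pvRF (sd : PySem.Dict String (List String)) (zr : List String) (x : String) :
    Option (Option Int) :=
  if x ∈ zr then some (some 0) else if x ∈ sd.keys then some none else none

-- W is a set of live nodes closed under live successors
def pvWCl (sd : PySem.Dict String (List String)) (dst : String) (zr W : List String) : Prop :=
  (∀ x ∈ W, pvLive sd dst zr x) ∧
  (∀ x ∈ W, ∀ w ∈ pvSuccs sd x, pvLive sd dst zr w → w ∈ W)

-- ---- expansion / termination lemmas ----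

theorem pvExpandIter_append (sd : PySem.Dict String (List String)) (S : List String) :
    ∀ (k : Nat) (l₁ l₂ : List String),
      (pvExpand sd S)^[k] (l₁ ++ l₂) = (pvExpand sd S)^[k] l₁ ++ (pvExpand sd S)^[k] l₂ := by
  intro k
  induction k with
  | zero => intro l1 l2; simp
  | succ k ih =>
    intro l1 l2
    rw [Function.iterate_succ_apply, Function.iterate_succ_apply, Function.iterate_succ_apply]
    rw [show pvExpand sd S (l1 ++ l2) = pvExpand sd S l1 ++ pvExpand sd S l2 from
      List.flatMap_append]
    exact ih _ _

theorem pvDie_of_mem (sd : PySem.Dict String (List String)) {S : List String} {k : Nat}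
    {l : List String} (h : (pvExpand sd S)^[k] l = []) {v : String} (hv : v ∈ l) :
    pvDie sd S k v := by
  induction l with
  | nil => cases hv
  | cons a l ih =>
    rw [show (a :: l) = [a] ++ l from rfl, pvExpandIter_append] at h
    rcases List.mem_cons.1 hv with rfl | hv
    · exact (List.append_eq_nil_iff.1 h).1
    · exact ih (List.append_eq_nil_iff.1 h).2 hv

theorem pvDie_pos (sd : PySem.Dict String (List String)) {S : List String} {k : Nat}
    {v : String} (h : pvDie sd S k v) : 0 < k := by
  rcases Nat.eq_zero_or_pos k with rfl | hk
  · simp [pvDie] at h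
  · exact hk

theorem pvDie_succ (sd : PySem.Dict String (List String)) {S : List String} {k : Nat}
    {v u : String} (h : pvDie sd S (k + 1) v) (hvS : v ∉ S) (hu : u ∈ pvSuccs sd v) :
    pvDie sd S k u := by
  have : (pvExpand sd S)^[k] (pvExpand sd S [v]) = [] := by
    rw [← Function.iterate_succ_apply]; exact h
  apply pvDie_of_mem sd this
  simpa [pvExpand, hvS] using hu

-- ---- value lemmas ----

theorem pvVal_stab (sd : PySem.Dict String (List String)) (dst : String) (pc : Int)
    (zr S : List String) (hS : ∀ x ∈ S, x = dst ∨ x ∈ zr) :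
    ∀ (k : Nat) (v : String), pvDie sd S k v → ∀ m : Nat, k ≤ m →
      pvVal sd dst pc zr m v = pvVal sd dst pc zr k v := by
  intro k
  induction k with
  | zero => intro v h; exact absurd (pvDie_pos sd h) (by omega)
  | succ k ih =>
    intro v h m hm
    obtain ⟨m, rfl⟩ : ∃ m', m = m' + 1 := ⟨m - 1, by omega⟩
    show pvVal sd dst pc zr (m + 1) v = pvVal sd dst pc zr (k + 1) v
    simp only [pvVal]
    split_ifs with h1 h2
    · rfl
    · rfl
    · refine congrArg List.sum (List.map_congr_left ?_)
      intro u hu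
      exact ih u (pvDie_succ sd h (fun hv => (hS v hv).elim h1 h2) hu) m (by omega)

theorem pvVal_sum_succs (sd : PySem.Dict String (List String)) (dst : String) (pc : Int)
    (zr S : List String) (hS : ∀ x ∈ S, x = dst ∨ x ∈ zr) {k N : Nat} {v : String}
    (hdie : pvDie sd S k v) (hkN : k ≤ N) (h1 : v ≠ dst) (h2 : v ∉ zr) :
    pvVal sd dst pc zr N v = ((pvSuccs sd v).map (pvVal sd dst pc zr N)).sum := by
  have hk1 := pvDie_pos sd hdie
  obtain ⟨k, rfl⟩ : ∃ k', k = k' + 1 := ⟨k - 1, by omega⟩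
  have hvS : v ∉ S := fun hv => (hS v hv).elim h1 h2
  calc pvVal sd dst pc zr N v = pvVal sd dst pc zr (k + 1) v :=
        pvVal_stab sd dst pc zr S hS (k + 1) v hdie N hkN
    _ = ((pvSuccs sd v).map (pvVal sd dst pc zr k)).sum := by
        simp only [pvVal]; rw [if_neg h1, if_neg h2]
    _ = ((pvSuccs sd v).map (pvVal sd dst pc zr N)).sum := by
        refine congrArg List.sum (List.map_congr_left ?_)
        intro u hu
        exact (pvVal_stab sd dst pc zr S hS k u (pvDie_succ sd hdie hvS hu) N (by omega)).symm

-- ---- dict-building lemmas ----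

theorem pvGet?_ofList_map {ν : Type} (ks : List String) (hnd : ks.Nodup) (g : String → ν)
    (x : String) :
    (PySem.Dict.ofList (ks.map (fun k => (k, g k)))).get? x =
      if x ∈ ks then some (g x) else none := by
  have hrfl : PySem.Dict.ofList (ks.map (fun k => (k, g k))) =
      ks.foldl (fun d k => d.insert k (g k)) PySem.Dict.empty := by
    show (ks.map (fun k => (k, g k))).foldl (fun d p => d.insert p.1 p.2) PySem.Dict.empty = _
    rw [List.foldl_map]
  have hitems : (PySem.Dict.ofList (ks.map (fun k => (k, g k)))).items =
      ks.map (fun k => (k, g k)) := by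
    rw [hrfl]
    simpa using PySem.Dict.items_foldl_insert_fresh ks id g PySem.Dict.empty
      (by intro a _; simp) (by simpa using hnd)
  by_cases hx : x ∈ ks
  · rw [if_pos hx]
    exact PySem.Dict.get?_of_mem_items _ (by rw [hitems]; exact List.mem_map_of_mem hx)
      (PySem.Dict.nodup_keys_ofList _)
  · rw [if_neg hx, (PySem.Dict.get?_eq_none_iff_not_mem_keys _ x)]
    intro hmem
    apply hx
    have : (PySem.Dict.ofList (ks.map (fun k => (k, g k)))).keys = ks := by
      show (PySem.Dict.ofList (ks.map (fun k => (k, g k)))).items.map Prod.fst = ks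
      rw [hitems, List.map_map]
      exact (List.map_congr_left (fun a _ => rfl)).trans (List.map_id _)
    rwa [this] at hmem

theorem pvSuccs_of_not_mem (sd : PySem.Dict String (List String)) {v : String}
    (h : v ∉ sd.keys) : pvSuccs sd v = [] := by
  show sd.getD v [] = []
  apply PySem.Dict.getD_of_not_contains
  by_contra hc
  exact h ((PySem.Dict.contains_iff_mem_keys sd v).1 (by
    cases hcv : sd.contains v with
    | false => exact absurd hcv hc
    | true => rfl))

-- ---- clear_paths (A's between-segment reset) ----

theorem pvClear_spec (d : PySem.Dict String (Option Int)) (hnd : d.keys.Nodup) :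
    (pvClear d).keys = d.keys ∧
    ∀ x, (pvClear d).get? x =
      match d.get? x with
      | some (some _) => some (some 0)
      | o => o := by
  have key : ∀ (K : List String) (acc : PySem.Dict String (Option Int)), K.Nodup →
      (∀ y ∈ K, acc.get? y = d.get? y) → acc.keys = d.keys →
      ((K.foldl pvClearStep acc).keys = d.keys ∧
       ∀ x, (K.foldl pvClearStep acc).get? x =
            if x ∈ K then
              (match d.get? x with
               | some (some _) => some (some 0)
               | o => o)
            else acc.get? x) := by
    intro K
    induction K with
    | nil => intro acc _ _ hkeys; exact ⟨hkeys, fun x => by simp⟩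
    | cons p K ih =>
      intro acc hK hacc hkeys
      have hpd : acc.get? p = d.get? p := hacc p List.mem_cons_self
      have hKnd : K.Nodup := (List.nodup_cons.1 hK).2
      have hpK : p ∉ K := (List.nodup_cons.1 hK).1
      rw [List.foldl_cons]
      rcases hdp : acc.get? p with _ | op
      · have step : pvClearStep acc p = acc := by unfold pvClearStep; rw [hdp]
        rw [step]
        obtain ⟨hk2, hg2⟩ := ih acc hKnd (fun y hy => hacc y (List.mem_cons_of_mem _ hy)) hkeys
        refine ⟨hk2, fun x => ?_⟩
        rw [hg2 x]
        by_cases hxK : x ∈ K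
        · rw [if_pos hxK, if_pos (List.mem_cons_of_mem _ hxK)]
        · by_cases hxp : x = p
          · subst hxp
            rw [if_neg hxK, if_pos List.mem_cons_self, ← hpd, hdp]
          · rw [if_neg hxK, if_neg (by simpa using ⟨hxp, hxK⟩)]
      · rcases op with _ | a
        · have step : pvClearStep acc p = acc := by unfold pvClearStep; rw [hdp]
          rw [step]
          obtain ⟨hk2, hg2⟩ := ih acc hKnd (fun y hy => hacc y (List.mem_cons_of_mem _ hy)) hkeys
          refine ⟨hk2, fun x => ?_⟩
          rw [hg2 x]
          by_cases hxK : x ∈ K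
          · rw [if_pos hxK, if_pos (List.mem_cons_of_mem _ hxK)]
          · by_cases hxp : x = p
            · subst hxp
              rw [if_neg hxK, if_pos List.mem_cons_self, ← hpd, hdp]
            · rw [if_neg hxK, if_neg (by simpa using ⟨hxp, hxK⟩)]
        · have step : pvClearStep acc p = acc.insert p (some 0) := by
            unfold pvClearStep; rw [hdp]
          rw [step]
          have hkeys' : (acc.insert p (some 0)).keys = d.keys := by
            rw [PySem.Dict.keys_insert_of_contains _ _ (by
              rw [PySem.Dict.contains_eq_isSome_get?, hdp]; rfl), hkeys]
          obtain ⟨hk2, hg2⟩ := ih (acc.insert p (some 0)) hKnd (by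
            intro y hy
            have hne : y ≠ p := fun hyp => hpK (by rwa [hyp] at hy)
            rw [acc.get?_insert_of_ne (some 0) hne,
              hacc y (List.mem_cons_of_mem _ hy)]) hkeys'
          refine ⟨hk2, fun x => ?_⟩
          rw [hg2 x]
          by_cases hxK : x ∈ K
          · rw [if_pos hxK, if_pos (List.mem_cons_of_mem _ hxK)]
          · by_cases hxp : x = p
            · subst hxp
              rw [if_neg hxK, if_pos List.mem_cons_self, ← hpd, hdp,
                PySem.Dict.get?_insert_self]
            · rw [if_neg hxK, if_neg (by simpa using ⟨hxp, hxK⟩),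
                acc.get?_insert_of_ne (some 0) hxp]
  obtain ⟨hk, hg⟩ := key d.keys d hnd (fun _ _ => rfl) rfl
  refine ⟨hk, fun x => ?_⟩
  rw [show pvClear d = d.keys.foldl pvClearStep d from rfl, hg x]
  by_cases hx : x ∈ d.keys
  · rw [if_pos hx]
  · rw [if_neg hx, (PySem.Dict.get?_eq_none_iff_not_mem_keys d x).2 hx]

-- ---- B's between-segment reset over memo.items() ----

theorem pvClearB_spec (d : PySem.Dict String (Option Int)) (hnd : d.keys.Nodup) :
    (pvClearB d).keys = d.keys ∧
    ∀ x, (pvClearB d).get? x =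
      match d.get? x with
      | some (some _) => some (some 0)
      | o => o := by
  have key : ∀ (I : List (String × Option Int)) (acc : PySem.Dict String (Option Int)),
      (∀ p ∈ I, acc.contains p.1 = true) →
      ((I.foldl (fun acc p => if p.2.isSome then acc.insert p.1 (some 0) else acc) acc).keys
          = acc.keys ∧
       ∀ x, (I.foldl (fun acc p => if p.2.isSome then acc.insert p.1 (some 0) else acc)
            acc).get? x =
         if I.any (fun p => p.1 == x && p.2.isSome) then some (some 0) else acc.get? x) := by
    intro I
    induction I with
    | nil => intro acc _; exact ⟨rfl, fun x => by simp⟩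
    | cons p I ih =>
      intro acc hc
      rw [List.foldl_cons]
      cases hp2 : p.2.isSome with
      | false =>
        rw [if_neg Bool.false_ne_true]
        obtain ⟨hk, hg⟩ := ih acc (fun q hq => hc q (List.mem_cons_of_mem _ hq))
        refine ⟨hk, fun x => ?_⟩
        rw [hg x, List.any_cons,
          show (p.1 == x && p.2.isSome) = false from by rw [hp2, Bool.and_false],
          Bool.false_or]
      | true =>
        rw [if_pos rfl]
        have hcp : acc.contains p.1 = true := hc p List.mem_cons_self
        have hcont' : ∀ q ∈ I, (acc.insert p.1 (some 0)).contains q.1 = true := by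
          intro q hq
          rw [PySem.Dict.contains_eq_isSome_get?, PySem.Dict.get?_insert]
          by_cases hqp : q.1 = p.1
          · rw [if_pos hqp]; rfl
          · rw [if_neg hqp, ← PySem.Dict.contains_eq_isSome_get?]
            exact hc q (List.mem_cons_of_mem _ hq)
        obtain ⟨hk, hg⟩ := ih (acc.insert p.1 (some 0)) hcont'
        refine ⟨hk.trans (PySem.Dict.keys_insert_of_contains _ _ hcp), fun x => ?_⟩
        rw [hg x, List.any_cons]
        by_cases hI : I.any (fun p => p.1 == x && p.2.isSome) = true
        · rw [if_pos hI, if_pos (by rw [hI, Bool.or_true])]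
        · rw [if_neg hI, PySem.Dict.get?_insert]
          by_cases hxp : x = p.1
          · rw [if_pos hxp, if_pos (by simp [hxp, hp2])]
          · rw [if_neg hxp,
              if_neg (by
                simp only [Bool.or_eq_true, Bool.and_eq_true, beq_iff_eq]
                rintro (⟨h1, _⟩ | h2)
                · exact hxp h1.symm
                · exact hI h2)]
  obtain ⟨hk, hg⟩ := key d.items d (by
    intro p hp
    rw [PySem.Dict.contains_eq_isSome_get?, PySem.Dict.get?_of_mem_items _ hp hnd]
    rfl)
  refine ⟨hk, fun x => ?_⟩
  rw [show pvClearB d = d.items.foldl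
      (fun acc p => if p.2.isSome then acc.insert p.1 (some 0) else acc) d from rfl, hg x]
  by_cases hany : d.items.any (fun p => p.1 == x && p.2.isSome) = true
  · rw [if_pos hany]
    obtain ⟨p, hp, hpx⟩ := List.any_eq_true.1 hany
    obtain ⟨hpx1, hpx2⟩ : p.1 = x ∧ p.2.isSome = true := by simpa using hpx
    have hget : d.get? x = some p.2 := by
      rw [← hpx1]
      exact PySem.Dict.get?_of_mem_items _ hp hnd
    rcases hp2 : p.2 with _ | w
    · rw [hp2] at hpx2; cases hpx2
    · rw [hget, hp2]
  · rw [if_neg hany]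
    rcases hget : d.get? x with _ | o
    · rfl
    · rcases ho : o with _ | w
      · rfl
      · exfalso
        apply hany
        refine List.any_eq_true.2 ⟨(x, some w), ?_, by simp⟩
        exact PySem.Dict.mem_items_of_get?_eq_some _ (by rw [hget, ho])

-- ---- reachability lemmas ----

theorem pvRch_trans_succ (sd : PySem.Dict String (List String)) (dst : String)
    (zr : List String) {v u x : String} (h : pvRch sd dst zr u x) (hu : u ∈ pvSuccs sd v)
    (hv : pvLive sd dst zr v) : pvRch sd dst zr v x := by
  induction h with
  | refl h1 => exact pvRch.step _ _ _ (pvRch.refl v hv) hu h1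
  | step b c hab hbc hc ih => exact pvRch.step _ _ _ ih hbc hc

theorem pvRch_in_closed (sd : PySem.Dict String (List String)) (dst : String)
    (zr W : List String) (hW : pvWCl sd dst zr W) {src : String}
    (hsrc : pvLive sd dst zr src → src ∈ W) :
    ∀ u, pvRch sd dst zr src u → u ∈ W := by
  intro u h
  induction h with
  | refl hv => exact hsrc hv
  | step b c hab hbc hc ih => exact hW.2 b ih c hbc hc

theorem pvDF_congr (sd : PySem.Dict String (List String)) (dst : String) (pc : Int)
    (zr : List String) (N : Nat) {W W' : List String} {x : String} (h : x ∈ W ↔ x ∈ W') :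
    pvDF sd dst pc zr W N x = pvDF sd dst pc zr W' N x := by
  unfold pvDF
  by_cases h1 : x = dst
  · rw [if_pos h1, if_pos h1]
  · rw [if_neg h1, if_neg h1]
    by_cases h2 : x ∈ zr
    · rw [if_pos h2, if_pos h2]
    · rw [if_neg h2, if_neg h2]
      by_cases h3 : x ∈ W
      · rw [if_pos h3, if_pos (h.1 h3)]
      · rw [if_neg h3, if_neg (fun h' => h3 (h.2 h'))]

-- ---- the main simulation of calc_paths_to_destination (A) ----

theorem pvCalc_main (sd : PySem.Dict String (List String)) (dst : String) (pc : Int)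
    (zr S : List String) (hS : ∀ x ∈ S, x = dst ∨ x ∈ zr) (N : Nat) :
    ∀ (fuel k : Nat) (v : String) (W : List String) (d : PySem.Dict String (Option Int)),
      (∀ x, d.get? x = pvDF sd dst pc zr W N x) →
      pvWCl sd dst zr W → d.keys.Nodup →
      pvDie sd S k v → k ≤ fuel → k ≤ N →
      ∃ W' : List String,
        (pvCalc sd fuel v dst d).1 = pvVal sd dst pc zr N v ∧
        (∀ x, (pvCalc sd fuel v dst d).2.get? x = pvDF sd dst pc zr W' N x) ∧
        (pvCalc sd fuel v dst d).2.keys.Nodup ∧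
        (∀ x ∈ W, x ∈ W') ∧ pvWCl sd dst zr W' ∧
        (∀ x ∈ W', x ∉ W → pvRch sd dst zr v x) ∧
        (pvLive sd dst zr v → v ∈ W') := by
  intro fuel
  induction fuel with
  | zero =>
    intro k v W d hd hW hnd hdie hkf hkN
    exact absurd (pvDie_pos sd hdie) (by omega)
  | succ fuel ih =>
    intro k v W d hd hW hnd hdie hkf hkN
    have hk1 : 0 < k := pvDie_pos sd hdie
    obtain ⟨N', rfl⟩ : ∃ N', N = N' + 1 := ⟨N - 1, by omega⟩
    have hv := hd v
    unfold pvDF at hv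
    by_cases h1 : v = dst
    · rw [if_pos h1] at hv
      have heq : pvCalc sd (fuel + 1) v dst d = (pc, d) := by
        simp only [pvCalc]; rw [hv]
      refine ⟨W, ?_, ?_, ?_, fun x hx => hx, hW, ?_, ?_⟩
      · rw [heq]; simp [pvVal, h1]
      · intro x; rw [heq]; exact hd x
      · rw [heq]; exact hnd
      · intro x hx hnx; exact absurd hx hnx
      · intro hlive; exact absurd h1 hlive.1
    · rw [if_neg h1] at hv
      by_cases h2 : v ∈ zr
      · rw [if_pos h2] at hv
        have heq : pvCalc sd (fuel + 1) v dst d = (0, d) := by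
          simp only [pvCalc]; rw [hv]
        refine ⟨W, ?_, ?_, ?_, fun x hx => hx, hW, ?_, ?_⟩
        · rw [heq]; simp [pvVal, h1, h2]
        · intro x; rw [heq]; exact hd x
        · rw [heq]; exact hnd
        · intro x hx hnx; exact absurd hx hnx
        · intro hlive; exact absurd h2 hlive.2.1
      · rw [if_neg h2] at hv
        by_cases h3 : v ∈ W
        · rw [if_pos h3] at hv
          have heq : pvCalc sd (fuel + 1) v dst d = (pvVal sd dst pc zr (N' + 1) v, d) := by
            simp only [pvCalc]; rw [hv]
          refine ⟨W, ?_, ?_, ?_, fun x hx => hx, hW, ?_, ?_⟩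
          · rw [heq]
          · intro x; rw [heq]; exact hd x
          · rw [heq]; exact hnd
          · intro x hx hnx; exact absurd hx hnx
          · intro _; exact h3
        · rw [if_neg h3] at hv
          by_cases h4 : v ∈ sd.keys
          · rw [if_pos h4] at hv
            obtain ⟨k', rfl⟩ : ∃ k'', k = k'' + 1 := ⟨k - 1, by omega⟩
            have hvS : v ∉ S := fun hv' => (hS v hv').elim h1 h2
            have hsuccdie : ∀ u ∈ sd.getD v [], pvDie sd S k' u := by
              intro u hu; exact pvDie_succ sd hdie hvS hu
            have fold : ∀ (L : List String), (∀ u ∈ L, pvDie sd S k' u) →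
                ∀ (s : Int) (d₁ : PySem.Dict String (Option Int)) (W₁ : List String),
                  (∀ x, d₁.get? x = pvDF sd dst pc zr W₁ (N' + 1) x) →
                  pvWCl sd dst zr W₁ → d₁.keys.Nodup →
                  ∃ W₂ : List String,
                    (L.foldl (fun acc u =>
                        let r := pvCalc sd fuel u dst acc.2
                        (acc.1 + r.1, r.2)) (s, d₁)).1 =
                      s + (L.map (pvVal sd dst pc zr (N' + 1))).sum ∧
                    (∀ x, (L.foldl (fun acc u =>
                        let r := pvCalc sd fuel u dst acc.2
                        (acc.1 + r.1, r.2)) (s, d₁)).2.get? x =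
                      pvDF sd dst pc zr W₂ (N' + 1) x) ∧
                    (L.foldl (fun acc u =>
                        let r := pvCalc sd fuel u dst acc.2
                        (acc.1 + r.1, r.2)) (s, d₁)).2.keys.Nodup ∧
                    (∀ x ∈ W₁, x ∈ W₂) ∧ pvWCl sd dst zr W₂ ∧
                    (∀ x ∈ W₂, x ∉ W₁ → ∃ u ∈ L, pvRch sd dst zr u x) ∧
                    (∀ u ∈ L, pvLive sd dst zr u → u ∈ W₂) := by
              intro L
              induction L with
              | nil =>
                intro _ s d₁ W₁ hd₁ hW₁ hnd₁
                refine ⟨W₁, by simp, hd₁, hnd₁, fun x hx => hx, hW₁, ?_, by simp⟩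
                intro x hx hnx; exact absurd hx hnx
              | cons u L ihL =>
                intro hLdie s d₁ W₁ hd₁ hW₁ hnd₁
                obtain ⟨W₂, e1, e2, e3, e4, e5, e6, e7⟩ :=
                  ih k' u W₁ d₁ hd₁ hW₁ hnd₁ (hLdie u List.mem_cons_self) (by omega) (by omega)
                obtain ⟨W₃, f1, f2, f3, f4, f5, f6, f7⟩ :=
                  ihL (fun w hw => hLdie w (List.mem_cons_of_mem _ hw))
                    (s + (pvCalc sd fuel u dst d₁).1) (pvCalc sd fuel u dst d₁).2 W₂ e2 e5 e3
                rw [List.foldl_cons]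
                refine ⟨W₃, ?_, f2, f3, fun x hx => f4 x (e4 x hx), f5, ?_, ?_⟩
                · rw [f1, e1, List.map_cons, List.sum_cons]; ring
                · intro x hx hnx
                  by_cases hx2 : x ∈ W₂
                  · exact ⟨u, List.mem_cons_self, e6 x hx2 hnx⟩
                  · obtain ⟨w, hw, hrch⟩ := f6 x hx hx2
                    exact ⟨w, List.mem_cons_of_mem _ hw, hrch⟩
                · intro w hw hlw
                  rcases List.mem_cons.1 hw with rfl | hw'
                  · exact f4 _ (e7 hlw)
                  · exact f7 w hw' hlw
            obtain ⟨W₂, e1, e2, e3, e4, e5, e6, e7⟩ :=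
              fold (sd.getD v []) hsuccdie 0 d W hd hW hnd
            have hvlive : pvLive sd dst zr v := ⟨h1, h2, h4⟩
            have heq : pvCalc sd (fuel + 1) v dst d =
                ((fun p => (p.1, p.2.insert v (some p.1)))
                  ((sd.getD v []).foldl (fun acc u =>
                      let r := pvCalc sd fuel u dst acc.2
                      (acc.1 + r.1, r.2)) ((0 : Int), d))) := by
              simp only [pvCalc]; rw [hv]
            have hval : ((sd.getD v []).foldl (fun acc u =>
                let r := pvCalc sd fuel u dst acc.2
                (acc.1 + r.1, r.2)) ((0 : Int), d)).1 = pvVal sd dst pc zr (N' + 1) v := by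
              rw [e1, zero_add]
              exact (pvVal_sum_succs sd dst pc zr S hS hdie hkN h1 h2).symm
            refine ⟨v :: W₂, ?_, ?_, ?_, ?_, ?_, ?_, ?_⟩
            · rw [heq]; exact hval
            · intro x
              rw [heq]
              simp only []
              rw [PySem.Dict.get?_insert]
              by_cases hxv : x = v
              · rw [if_pos hxv, hxv]
                unfold pvDF
                rw [if_neg h1, if_neg h2, if_pos List.mem_cons_self, hval]
              · rw [if_neg hxv, e2 x]
                exact pvDF_congr sd dst pc zr (N' + 1)
                  (by simp [List.mem_cons, hxv])
            · rw [heq]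
              exact PySem.Dict.nodup_keys_insert _ _ _ e3
            · intro x hx; exact List.mem_cons_of_mem _ (e4 x hx)
            · constructor
              · intro x hx
                rcases List.mem_cons.1 hx with rfl | hx'
                · exact hvlive
                · exact e5.1 x hx'
              · intro x hx w hw hlw
                rcases List.mem_cons.1 hx with rfl | hx'
                · exact List.mem_cons_of_mem _ (e7 w hw hlw)
                · exact List.mem_cons_of_mem _ (e5.2 x hx' w hw hlw)
            · intro x hx hnx
              rcases List.mem_cons.1 hx with rfl | hx'
              · exact pvRch.refl x hvlive
              · obtain ⟨u, hu, hrch⟩ := e6 x hx' hnx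
                exact pvRch_trans_succ sd dst zr hrch hu hvlive
            · intro _; exact List.mem_cons_self
          · rw [if_neg h4] at hv
            have heq : pvCalc sd (fuel + 1) v dst d = (0, d) := by
              simp only [pvCalc]; rw [hv]
            refine ⟨W, ?_, ?_, ?_, fun x hx => hx, hW, ?_, ?_⟩
            · rw [heq]
              simp [pvVal, h1, h2, pvSuccs_of_not_mem sd h4]
            · intro x; rw [heq]; exact hd x
            · rw [heq]; exact hnd
            · intro x hx hnx; exact absurd hx hnx
            · intro hlive; exact absurd hlive.2.2 h4

-- ---- small facts about B's stack machine ----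

theorem pvRun_nil_stack (sd : PySem.Dict String (List String)) (fuel : Nat)
    (d : PySem.Dict String (Option Int)) : pvRun sd fuel [] d = d := by
  cases fuel <;> rfl

theorem pvUnres_iff (sd : PySem.Dict String (List String)) (dst : String) (pc : Int)
    (zr W : List String) (N : Nat) (d : PySem.Dict String (Option Int))
    (hd : ∀ x, d.get? x = pvDF sd dst pc zr W N x) (u : String) :
    pvUnres d u = true ↔ (pvLive sd dst zr u ∧ u ∉ W) := by
  rw [show pvUnres d u = (d.get? u == some none) from rfl, beq_iff_eq, hd u]
  unfold pvDF pvLive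
  by_cases h1 : u = dst
  · simp [h1]
  · rw [if_neg h1]
    by_cases h2 : u ∈ zr
    · simp [h1, h2]
    · rw [if_neg h2]
      by_cases h3 : u ∈ W
      · simp [h1, h2, h3]
      · rw [if_neg h3]
        by_cases h4 : u ∈ sd.keys
        · simp [h1, h2, h3, h4]
        · simp [h1, h2, h3, h4]

theorem pvRead_resolved (sd : PySem.Dict String (List String)) (dst : String) (pc : Int)
    (zr W : List String) (N : Nat) (hN : 0 < N) (d : PySem.Dict String (Option Int))
    (hd : ∀ x, d.get? x = pvDF sd dst pc zr W N x) (u : String)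
    (hres : ¬ (pvLive sd dst zr u ∧ u ∉ W)) :
    pvRead d u = pvVal sd dst pc zr N u := by
  obtain ⟨N', rfl⟩ : ∃ N', N = N' + 1 := ⟨N - 1, by omega⟩
  rw [show pvRead d u = (match d.get? u with | some (some x) => x | _ => 0) from rfl, hd u]
  unfold pvDF
  by_cases h1 : u = dst
  · rw [if_pos h1]; simp [pvVal, h1]
  · rw [if_neg h1]
    by_cases h2 : u ∈ zr
    · rw [if_pos h2]; simp [pvVal, h1, h2]
    · rw [if_neg h2]
      by_cases h3 : u ∈ W
      · rw [if_pos h3]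
      · rw [if_neg h3]
        by_cases h4 : u ∈ sd.keys
        · exact absurd ⟨⟨h1, h2, h4⟩, h3⟩ hres
        · rw [if_neg h4]
          simp [pvVal, h1, h2, pvSuccs_of_not_mem sd h4]

theorem pvC_ge_two (sd : PySem.Dict String (List String)) : 2 ≤ pvC sd := by
  unfold pvC; omega

theorem pvSuccLen_le (sd : PySem.Dict String (List String)) (v : String) :
    (sd.getD v []).length + 2 ≤ pvC sd := by
  unfold pvC
  rw [PySem.Dict.getD_eq_get?_getD]
  cases hg : sd.get? v with
  | none => simp
  | some l =>
    have hm : l.length ∈ sd.items.map (fun p => p.2.length) :=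
      List.mem_map_of_mem (PySem.Dict.mem_items_of_get?_eq_some _ hg)
    have := List.single_le_sum (fun (x : Nat) _ => Nat.zero_le x) _ hm
    simpa using Nat.add_le_add_right this 2

-- ---- the main simulation of B's stack machine ----
-- executing one node on top of the stack costs at most (pvC sd)^(k+1) iterations and leaves
-- the memo in the same canonical shape pvCalc produces
theorem pvRun_main (sd : PySem.Dict String (List String)) (dst : String) (pc : Int)
    (zr S : List String) (hS : ∀ x ∈ S, x = dst ∨ x ∈ zr) (N : Nat) :
    ∀ (k : Nat) (v : String) (W : List String) (d : PySem.Dict String (Option Int)),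
      (∀ x, d.get? x = pvDF sd dst pc zr W N x) →
      pvWCl sd dst zr W → d.keys.Nodup →
      pvDie sd S k v → k ≤ N →
      ∃ (n : Nat) (d₂ : PySem.Dict String (Option Int)) (W' : List String),
        n ≤ (pvC sd) ^ (k + 1) ∧
        (∀ (rest : List String) (fuel : Nat),
          pvRun sd (n + fuel) (v :: rest) d = pvRun sd fuel rest d₂) ∧
        (∀ x, d₂.get? x = pvDF sd dst pc zr W' N x) ∧
        d₂.keys.Nodup ∧
        (∀ x ∈ W, x ∈ W') ∧ pvWCl sd dst zr W' ∧
        (∀ x ∈ W', x ∉ W → pvRch sd dst zr v x) ∧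
        (pvLive sd dst zr v → v ∈ W') := by
  intro k
  induction k using Nat.strong_induction_on with
  | _ k ih =>
  intro v W d hd hW hnd hdie hkN
  have hk1 : 0 < k := pvDie_pos sd hdie
  have hone : 1 ≤ (pvC sd) ^ (k + 1) := Nat.one_le_pow _ _ (by have := pvC_ge_two sd; omega)
  by_cases hu : pvUnres d v = true
  · -- v is unresolved: it is live and not yet written
    obtain ⟨hvlive, hvW⟩ := (pvUnres_iff sd dst pc zr W N d hd v).1 hu
    obtain ⟨k', rfl⟩ : ∃ k'', k = k'' + 1 := ⟨k - 1, by omega⟩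
    have hvS : v ∉ S := fun hv' => (hS v hv').elim hvlive.1 hvlive.2.1
    have hsuccdie : ∀ u ∈ sd.getD v [], pvDie sd S k' u := by
      intro u hu'; exact pvDie_succ sd hdie hvS hu'
    -- executing a list of nodes (each with die-measure k') in sequence
    have fold : ∀ (L : List String), (∀ u ∈ L, pvDie sd S k' u) →
        ∀ (d₁ : PySem.Dict String (Option Int)) (W₁ : List String),
          (∀ x, d₁.get? x = pvDF sd dst pc zr W₁ N x) →
          pvWCl sd dst zr W₁ → d₁.keys.Nodup →
          ∃ (n : Nat) (d₂ : PySem.Dict String (Option Int)) (W₂ : List String),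
            n ≤ L.length * (pvC sd) ^ (k' + 1) ∧
            (∀ (rest : List String) (fuel : Nat),
              pvRun sd (n + fuel) (L ++ rest) d₁ = pvRun sd fuel rest d₂) ∧
            (∀ x, d₂.get? x = pvDF sd dst pc zr W₂ N x) ∧
            d₂.keys.Nodup ∧
            (∀ x ∈ W₁, x ∈ W₂) ∧ pvWCl sd dst zr W₂ ∧
            (∀ x ∈ W₂, x ∉ W₁ → ∃ u ∈ L, pvRch sd dst zr u x) ∧
            (∀ u ∈ L, pvLive sd dst zr u → u ∈ W₂) := by
      intro L
      induction L with
      | nil =>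
        intro _ d₁ W₁ hd₁ hW₁ hnd₁
        refine ⟨0, d₁, W₁, by simp, ?_, hd₁, hnd₁, fun x hx => hx, hW₁, ?_, by simp⟩
        · intro rest fuel; simp
        · intro x hx hnx; exact absurd hx hnx
      | cons u L ihL =>
        intro hLdie d₁ W₁ hd₁ hW₁ hnd₁
        obtain ⟨n₁, d₂, W₂, hb1, hr1, hg1, hn1, hs1, hc1, hrch1, hlv1⟩ :=
          ih k' (by omega) u W₁ d₁ hd₁ hW₁ hnd₁ (hLdie u List.mem_cons_self) (by omega)
        obtain ⟨n₂, d₃, W₃, hb2, hr2, hg2, hn2, hs2, hc2, hrch2, hlv2⟩ :=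
          ihL (fun w hw => hLdie w (List.mem_cons_of_mem _ hw)) d₂ W₂ hg1 hc1 hn1
        refine ⟨n₁ + n₂, d₃, W₃, ?_, ?_, hg2, hn2, fun x hx => hs2 x (hs1 x hx), hc2, ?_, ?_⟩
        · have := Nat.add_le_add hb1 hb2
          rw [List.length_cons, Nat.succ_mul]
          omega
        · intro rest fuel
          rw [Nat.add_assoc, List.cons_append, hr1 (L ++ rest) (n₂ + fuel), hr2 rest fuel]
        · intro x hx hnx
          by_cases hx2 : x ∈ W₂
          · exact ⟨u, List.mem_cons_self, hrch1 x hx2 hnx⟩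
          · obtain ⟨w, hw, hrch⟩ := hrch2 x hx hx2
            exact ⟨w, List.mem_cons_of_mem _ hw, hrch⟩
        · intro w hw hlw
          rcases List.mem_cons.1 hw with rfl | hw'
          · exact hs2 _ (hlv1 hlw)
          · exact hlv2 w hw' hlw
    by_cases hpend : (sd.getD v []).filter (fun s => pvUnres d s) = []
    · -- every successor is already resolved: write the sum and pop
      have hnone : ∀ w, w ∉ (sd.getD v []).filter (fun s => pvUnres d s) := by
        intro w hw
        rw [hpend] at hw
        cases hw
      have hsum : (sd.getD v []).foldl (fun a s => a + pvRead d s) 0 =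
          pvVal sd dst pc zr N v := by
        rw [PySem.List.foldl_add _ _ 0, zero_add]
        have : ∀ u ∈ sd.getD v [], pvRead d u = pvVal sd dst pc zr N u := by
          intro u hu'
          refine pvRead_resolved sd dst pc zr W N (by omega) d hd u ?_
          intro hcon
          have : pvUnres d u = true := (pvUnres_iff sd dst pc zr W N d hd u).2 hcon
          exact absurd (List.mem_filter.2 ⟨hu', this⟩) (hnone u)
        rw [List.map_congr_left this]
        exact (pvVal_sum_succs sd dst pc zr S hS hdie hkN hvlive.1 hvlive.2.1).symm
      refine ⟨1, d.insert v (some (pvVal sd dst pc zr N v)), v :: W, hone, ?_, ?_, ?_, ?_, ?_, ?_, ?_⟩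
      · intro rest fuel
        rw [Nat.add_comm 1 fuel]
        show (if pvUnres d v = true then _ else _) = _
        rw [if_pos hu, if_pos hpend, hsum]
      · intro x
        rw [PySem.Dict.get?_insert]
        by_cases hxv : x = v
        · rw [if_pos hxv, hxv]
          unfold pvDF
          rw [if_neg hvlive.1, if_neg hvlive.2.1, if_pos List.mem_cons_self]
        · rw [if_neg hxv, hd x]
          exact pvDF_congr sd dst pc zr N (by simp [List.mem_cons, hxv])
      · exact PySem.Dict.nodup_keys_insert _ _ _ hnd
      · intro x hx; exact List.mem_cons_of_mem _ hx
      · constructor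
        · intro x hx
          rcases List.mem_cons.1 hx with rfl | hx'
          · exact hvlive
          · exact hW.1 x hx'
        · intro x hx w hw hlw
          rcases List.mem_cons.1 hx with rfl | hx'
          · -- successors of v: resolved, hence in {dst} ∪ zr ∪ W; live ones are in W
            right
            have : pvUnres d w ≠ true := by
              intro hcon
              exact absurd (List.mem_filter.2 ⟨hw, hcon⟩) (hnone w)
            have := mt (pvUnres_iff sd dst pc zr W N d hd w).2 this
            by_contra hwW
            exact this ⟨hlw, hwW⟩
          · exact List.mem_cons_of_mem _ (hW.2 x hx' w hw hlw)
      · intro x hx hnx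
        rcases List.mem_cons.1 hx with rfl | hx'
        · exact pvRch.refl x hvlive
        · exact absurd hx' hnx
      · intro _; exact List.mem_cons_self
    · -- push the unresolved successors, resolve them, then revisit v
      obtain ⟨nL, d₂, W₂, hbL, hrL, hgL, hnL, hsL, hcL, hrchL, hlvL⟩ :=
        fold (((sd.getD v []).filter (fun s => pvUnres d s)).reverse)
          (by
            intro u hu'
            exact hsuccdie u (List.mem_filter.1 (List.mem_reverse.1 hu')).1)
          d W hd hW hnd
      -- after the pushed nodes are resolved, every live successor of v is written
      have hsuccres : ∀ w ∈ sd.getD v [], pvLive sd dst zr w → w ∈ W₂ := by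
        intro w hw hlw
        cases hwu : pvUnres d w with
        | true =>
          exact hlvL w (List.mem_reverse.2 (List.mem_filter.2 ⟨hw, hwu⟩)) hlw
        | false =>
          have := mt (pvUnres_iff sd dst pc zr W N d hd w).2 (by rw [hwu]; simp)
          have hwW : w ∈ W := by by_contra hc; exact this ⟨hlw, hc⟩
          exact hsL w hwW
      have hreach₂ : ∀ x ∈ W₂, x ∉ W → pvRch sd dst zr v x := by
        intro x hx hnx
        obtain ⟨u, hu', hrch⟩ := hrchL x hx hnx
        exact pvRch_trans_succ sd dst zr hrch
          (List.mem_filter.1 (List.mem_reverse.1 hu')).1 hvlive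
      have hbound : ∀ n, n = nL + 2 → n ≤ (pvC sd) ^ (k' + 1 + 1) := by
        intro n hn
        have hX : 1 ≤ (pvC sd) ^ (k' + 1) := Nat.one_le_pow _ _ (by have := pvC_ge_two sd; omega)
        have hlen : ((sd.getD v []).filter (fun s => pvUnres d s)).length ≤ pvC sd - 2 := by
          have h1 := List.length_filter_le (fun s => pvUnres d s) (sd.getD v [])
          have h2 := pvSuccLen_le sd v
          omega
        have h1 : nL ≤ (pvC sd - 2) * (pvC sd) ^ (k' + 1) := by
          refine hbL.trans ?_
          rw [List.length_reverse]
          exact Nat.mul_le_mul_right _ hlen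
        have h2 : (pvC sd - 2) * (pvC sd) ^ (k' + 1) + 2 * (pvC sd) ^ (k' + 1) =
            (pvC sd) ^ (k' + 1 + 1) := by
          rw [← Nat.add_mul,
            show pvC sd - 2 + 2 = pvC sd from by have := pvC_ge_two sd; omega]
          exact (pow_succ' _ _).symm
        omega
      by_cases hvW₂ : v ∈ W₂
      · -- v got resolved while resolving the pushed nodes (it was reachable from one of them)
        refine ⟨1 + nL + 1, d₂, W₂, hbound _ (by omega), ?_, hgL, hnL, hsL, hcL, hreach₂, fun _ => hvW₂⟩
        intro rest fuel
        have step1 : pvRun sd (1 + nL + 1 + fuel) (v :: rest) d =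
            pvRun sd (nL + (1 + fuel)) ((((sd.getD v []).filter (fun s => pvUnres d s)).reverse)
              ++ v :: rest) d := by
          rw [show 1 + nL + 1 + fuel = (nL + (1 + fuel)) + 1 from by omega]
          show (if pvUnres d v = true then _ else _) = _
          rw [if_pos hu, if_neg hpend]
        rw [step1, hrL (v :: rest) (1 + fuel)]
        rw [Nat.add_comm 1 fuel]
        show (if pvUnres d₂ v = true then _ else _) = _
        rw [if_neg (by
          intro hcon
          exact ((pvUnres_iff sd dst pc zr W₂ N d₂ hgL v).1 hcon).2 hvW₂)]
      · -- v is still unresolved; now all its successors are resolved, so it writes and pops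
        have hu₂ : pvUnres d₂ v = true :=
          (pvUnres_iff sd dst pc zr W₂ N d₂ hgL v).2 ⟨hvlive, hvW₂⟩
        have hpend₂ : (sd.getD v []).filter (fun s => pvUnres d₂ s) = [] := by
          rw [List.filter_eq_nil_iff]
          intro w hw hcon
          obtain ⟨hlw, hwW₂⟩ := (pvUnres_iff sd dst pc zr W₂ N d₂ hgL w).1 hcon
          exact hwW₂ (hsuccres w hw hlw)
        have hnone₂ : ∀ w, w ∉ (sd.getD v []).filter (fun s => pvUnres d₂ s) := by
          intro w hw
          rw [hpend₂] at hw
          cases hw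
        have hsum₂ : (sd.getD v []).foldl (fun a s => a + pvRead d₂ s) 0 =
            pvVal sd dst pc zr N v := by
          rw [PySem.List.foldl_add _ _ 0, zero_add]
          have : ∀ u ∈ sd.getD v [], pvRead d₂ u = pvVal sd dst pc zr N u := by
            intro u hu'
            refine pvRead_resolved sd dst pc zr W₂ N (by omega) d₂ hgL u ?_
            intro hcon
            have : pvUnres d₂ u = true := (pvUnres_iff sd dst pc zr W₂ N d₂ hgL u).2 hcon
            exact absurd (List.mem_filter.2 ⟨hu', this⟩) (hnone₂ u)
          rw [List.map_congr_left this]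
          exact (pvVal_sum_succs sd dst pc zr S hS hdie hkN hvlive.1 hvlive.2.1).symm
        refine ⟨1 + nL + 1, d₂.insert v (some (pvVal sd dst pc zr N v)), v :: W₂,
          hbound _ (by omega), ?_, ?_, ?_, ?_, ?_, ?_, ?_⟩
        · intro rest fuel
          have step1 : pvRun sd (1 + nL + 1 + fuel) (v :: rest) d =
              pvRun sd (nL + (1 + fuel)) ((((sd.getD v []).filter (fun s => pvUnres d s)).reverse)
                ++ v :: rest) d := by
            rw [show 1 + nL + 1 + fuel = (nL + (1 + fuel)) + 1 from by omega]
            show (if pvUnres d v = true then _ else _) = _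
            rw [if_pos hu, if_neg hpend]
          rw [step1, hrL (v :: rest) (1 + fuel), Nat.add_comm 1 fuel]
          show (if pvUnres d₂ v = true then _ else _) = _
          rw [if_pos hu₂, if_pos hpend₂, hsum₂]
        · intro x
          rw [PySem.Dict.get?_insert]
          by_cases hxv : x = v
          · rw [if_pos hxv, hxv]
            unfold pvDF
            rw [if_neg hvlive.1, if_neg hvlive.2.1, if_pos List.mem_cons_self]
          · rw [if_neg hxv, hgL x]
            exact pvDF_congr sd dst pc zr N (by simp [List.mem_cons, hxv])
        · exact PySem.Dict.nodup_keys_insert _ _ _ hnL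
        · intro x hx; exact List.mem_cons_of_mem _ (hsL x hx)
        · constructor
          · intro x hx
            rcases List.mem_cons.1 hx with rfl | hx'
            · exact hvlive
            · exact hcL.1 x hx'
          · intro x hx w hw hlw
            rcases List.mem_cons.1 hx with rfl | hx'
            · exact List.mem_cons_of_mem _ (hsuccres w hw hlw)
            · exact List.mem_cons_of_mem _ (hcL.2 x hx' w hw hlw)
        · intro x hx hnx
          rcases List.mem_cons.1 hx with rfl | hx'
          · exact pvRch.refl x hvlive
          · exact hreach₂ x hx' hnx
        · intro _; exact List.mem_cons_self
  · -- v is already resolved (or missing): pop it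
    refine ⟨1, d, W, hone, ?_, hd, hnd, fun x hx => hx, hW, ?_, ?_⟩
    · intro rest fuel
      rw [Nat.add_comm 1 fuel]
      show (if pvUnres d v = true then _ else _) = _
      rw [if_neg hu]
    · intro x hx hnx; exact absurd hx hnx
    · intro hlive
      have := mt (pvUnres_iff sd dst pc zr W N d hd v).2 hu
      by_contra hc
      exact this ⟨hlive, hc⟩

-- cleared-dict shape: resetting every written entry to 0 yields the between-segment shape
theorem pvClearShape (sd : PySem.Dict String (List String)) (dst : String) (pc : Int)
    (zr WA : List String) (N : Nat) (x : String) :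
    (match pvDF sd dst pc zr WA N x with
     | some (some _) => some (some 0)
     | o => o) = pvRF sd (dst :: (WA ++ zr)) x := by
  unfold pvDF pvRF
  by_cases h1 : x = dst
  · rw [if_pos h1, if_pos (show x ∈ dst :: (WA ++ zr) by simp [h1])]
  · rw [if_neg h1]
    by_cases h2 : x ∈ zr
    · rw [if_pos h2, if_pos (show x ∈ dst :: (WA ++ zr) by simp [h2])]
    · rw [if_neg h2]
      by_cases h3 : x ∈ WA
      · rw [if_pos h3, if_pos (show x ∈ dst :: (WA ++ zr) by simp [h3])]
      · rw [if_neg h3,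
          if_neg (show x ∉ dst :: (WA ++ zr) by
            simp only [List.mem_cons, List.mem_append]
            rintro (h | h | h)
            exacts [h1 h, h3 h, h2 h])]
        by_cases h4 : x ∈ sd.keys
        · rw [if_pos h4]
        · rw [if_neg h4]

-- ---- one iteration of the outer loop, both versions together ----

theorem pvIter (sd : PySem.Dict String (List String)) (N : Nat) (route : List String)
    (i : Int) (S : List String) (pc : Int) (zr : List String)
    (hS : ∀ x ∈ S, x = PySem.List.pyGetD route i "" ∨ x ∈ zr)
    (hdie : pvDie sd S N (PySem.List.pyGetD route (i - 1) ""))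
    (dA dB : PySem.Dict String (Option Int))
    (hdA : ∀ x, dA.get? x = pvRF sd zr x) (hndA : dA.keys.Nodup)
    (hdB : ∀ x, dB.get? x = pvRF sd zr x) (hndB : dB.keys.Nodup) :
    ∃ zr' : List String,
      (pvStepA sd route N (pc, dA) i).1 = (pvStepB sd route N (pc, dB) i).1 ∧
      (∀ x, (pvStepA sd route N (pc, dA) i).2.get? x = pvRF sd zr' x) ∧
      (pvStepA sd route N (pc, dA) i).2.keys.Nodup ∧
      (∀ x, (pvStepB sd route N (pc, dB) i).2.get? x = pvRF sd zr' x) ∧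
      (pvStepB sd route N (pc, dB) i).2.keys.Nodup ∧
      (∀ x ∈ zr, x ∈ zr') ∧ (PySem.List.pyGetD route i "" ∈ zr') := by
  set src := PySem.List.pyGetD route (i - 1) "" with hsrcdef
  set dst := PySem.List.pyGetD route i "" with hdstdef
  have hN1 : 0 < N := pvDie_pos sd hdie
  have hd1 : ∀ (d : PySem.Dict String (Option Int)), (∀ x, d.get? x = pvRF sd zr x) →
      ∀ x, (d.insert dst (some pc)).get? x = pvDF sd dst pc zr [] N x := by
    intro d hd x
    rw [PySem.Dict.get?_insert]
    unfold pvDF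
    by_cases hx : x = dst
    · rw [if_pos hx, if_pos hx]
    · rw [if_neg hx, if_neg hx, hd x]
      unfold pvRF
      by_cases h2 : x ∈ zr
      · rw [if_pos h2, if_pos h2]
      · rw [if_neg h2, if_neg h2, if_neg (List.not_mem_nil)]
  have hWCl0 : pvWCl sd dst zr [] :=
    ⟨fun x hx => absurd hx List.not_mem_nil, fun x hx => absurd hx List.not_mem_nil⟩
  -- A's side
  obtain ⟨WA, c1, c2, c3, c4, c5, c6, c7⟩ :=
    pvCalc_main sd dst pc zr S hS N N N src [] (dA.insert dst (some pc)) (hd1 dA hdA)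
      hWCl0 (PySem.Dict.nodup_keys_insert _ _ _ hndA) hdie (le_refl N) (le_refl N)
  -- B's side
  obtain ⟨n, d₂, WB, g0, g1, g2, g3, g4, g5, g6, g7⟩ :=
    pvRun_main sd dst pc zr S hS N N src [] (dB.insert dst (some pc)) (hd1 dB hdB)
      hWCl0 (PySem.Dict.nodup_keys_insert _ _ _ hndB) hdie (le_refl N)
  have hrunF : pvRun sd (pvFuel sd N) [src] (dB.insert dst (some pc)) = d₂ := by
    have hn : n ≤ pvFuel sd N := g0
    have := g1 [] (pvFuel sd N - n)
    rw [pvRun_nil_stack] at this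
    rw [show pvFuel sd N = n + (pvFuel sd N - n) from by omega]
    exact this
  -- the two written sets have the same members
  have hWmem : ∀ x, x ∈ WB ↔ x ∈ WA := by
    intro x
    constructor
    · intro hx
      exact pvRch_in_closed sd dst zr WA c5 (fun hlive => c7 hlive) x
        (g6 x hx List.not_mem_nil)
    · intro hx
      exact pvRch_in_closed sd dst zr WB g5 (fun hlive => g7 hlive) x
        (c6 x hx List.not_mem_nil)
  -- equal returned path counts
  have hval : (pvCalc sd N src dst (dA.insert dst (some pc))).1 = pvRead d₂ src := by
    rw [c1]
    refine (pvRead_resolved sd dst pc zr WB N hN1 d₂ g2 src ?_).symm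
    intro hcon
    exact hcon.2 (g7 hcon.1)
  -- the common zeroed set after clearing
  refine ⟨dst :: (WA ++ zr), ?_, ?_, ?_, ?_, ?_, ?_, ?_⟩
  · show (pvCalc sd N src dst (dA.insert dst (some pc))).1 = _
    show _ = pvRead (pvRun sd (pvFuel sd N) [src] (dB.insert dst (some pc))) src
    rw [hrunF]
    exact hval
  · -- A's cleared dict
    intro x
    obtain ⟨hck, hcg⟩ := pvClear_spec (pvCalc sd N src dst (dA.insert dst (some pc))).2 c3
    show (pvClear (pvCalc sd N src dst (dA.insert dst (some pc))).2).get? x = _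
    rw [hcg x, c2 x]
    exact pvClearShape sd dst pc zr WA N x
  · obtain ⟨hck, _⟩ := pvClear_spec (pvCalc sd N src dst (dA.insert dst (some pc))).2 c3
    show (pvClear (pvCalc sd N src dst (dA.insert dst (some pc))).2).keys.Nodup
    rw [hck]
    exact c3
  · -- B's cleared dict
    intro x
    obtain ⟨hck, hcg⟩ := pvClearB_spec d₂ g3
    show (pvClearB (pvRun sd (pvFuel sd N) [src] (dB.insert dst (some pc)))).get? x = _
    rw [hrunF, hcg x, g2 x, pvDF_congr sd dst pc zr N (hWmem x)]
    exact pvClearShape sd dst pc zr WA N x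
  · obtain ⟨hck, _⟩ := pvClearB_spec d₂ g3
    show (pvClearB (pvRun sd (pvFuel sd N) [src] (dB.insert dst (some pc)))).keys.Nodup
    rw [hrunF, hck]
    exact g3
  · intro x hx; simp [hx]
  · exact List.mem_cons_self

-- ---- the outer loop ----

theorem pvLoop (sd : PySem.Dict String (List String)) (N : Nat) (route : List String)
    (hseg : ∀ i : Nat, 1 ≤ i → i < route.length →
      pvDie sd (route.drop i) N (route.getD (i - 1) "")) :
    ∀ (b : Nat), b < route.length →
    ∀ (pc : Int) (zr : List String) (dA dB : PySem.Dict String (Option Int)),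
      (∀ x, dA.get? x = pvRF sd zr x) → dA.keys.Nodup →
      (∀ x, dB.get? x = pvRF sd zr x) → dB.keys.Nodup →
      (∀ j : Nat, b < j → j < route.length → route.getD j "" ∈ zr) →
      ((PySem.List.pyRange (b : Int) 0 (-1)).foldl (pvStepA sd route N) (pc, dA)).1 =
        ((PySem.List.pyRange (b : Int) 0 (-1)).foldl (pvStepB sd route N) (pc, dB)).1 := by
  intro b
  induction b with
  | zero =>
    intro _ pc zr dA dB _ _ _ _ _
    rw [PySem.List.pyRange_neg_one_eq_nil (by omega)]
    rfl
  | succ b ihb =>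
    intro hblen pc zr dA dB hdA hnA hdB hnB hcov
    have hcons : PySem.List.pyRange ((b + 1 : Nat) : Int) 0 (-1) =
        ((b + 1 : Nat) : Int) :: PySem.List.pyRange ((b : Nat) : Int) 0 (-1) := by
      have harg : ((b + 1 : Nat) : Int) - 1 = ((b : Nat) : Int) := by push_cast; ring
      rw [PySem.List.pyRange_neg_one_cons (by push_cast; omega), harg]
    have hsrc' : PySem.List.pyGetD route (((b + 1 : Nat) : Int) - 1) "" = route.getD b "" := by
      rw [PySem.List.pyGetD_of_nonneg route "" (by push_cast; omega),
        show ((((b + 1 : Nat) : Int) - 1).toNat) = b from by omega]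
    have hdst' : PySem.List.pyGetD route ((b + 1 : Nat) : Int) "" = route.getD (b + 1) "" := by
      rw [PySem.List.pyGetD_of_nonneg route "" (by push_cast; omega),
        show (((b + 1 : Nat) : Int).toNat) = b + 1 from by omega]
    have hdie0 := hseg (b + 1) (by omega) hblen
    have hdropmem : ∀ x ∈ route.drop (b + 1),
        x = PySem.List.pyGetD route ((b + 1 : Nat) : Int) "" ∨ x ∈ zr := by
      intro x hx
      obtain ⟨k, hk, hkeq⟩ := List.mem_iff_getElem.1 hx
      rw [List.getElem_drop] at hkeq
      have hjlen : b + 1 + k < route.length := by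
        have := List.length_drop (l := route) (i := b + 1)
        omega
      by_cases hk0 : k = 0
      · left
        rw [hdst', List.getD_eq_getElem route "" (by omega)]
        subst hk0
        exact hkeq.symm
      · right
        have := hcov (b + 1 + k) (by omega) hjlen
        rwa [List.getD_eq_getElem route "" hjlen, hkeq] at this
    obtain ⟨zr', q1, qA, qnA, qB, qnB, qsub, qdst⟩ :=
      pvIter sd N route ((b + 1 : Nat) : Int) (route.drop (b + 1)) pc zr hdropmem
        (by rw [hsrc']; exact hdie0) dA dB hdA hnA hdB hnB
    rw [hcons, List.foldl_cons, List.foldl_cons]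
    have hA : pvStepA sd route N (pc, dA) ((b + 1 : Nat) : Int) =
        ((pvStepB sd route N (pc, dB) ((b + 1 : Nat) : Int)).1,
         (pvStepA sd route N (pc, dA) ((b + 1 : Nat) : Int)).2) := by
      rw [← q1]
    rw [hA]
    refine ihb (by omega) _ _ _ _ qA qnA qB qnB ?_
    intro j hj hjlen
    by_cases hjb : j = b + 1
    · rw [hjb, ← hdst']
      exact qdst
    · exact qsub _ (hcov j (by omega) hjlen)

-- ===== VERDICT (by name: the statement is the Claim_ definition above) =====
theorem traverse_route_spec : Claim_equal_traverse_route := by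
  intro route servers _ hpre
  show traverse_route route servers = traverse_route_alt route servers
  rcases hpre with hshort | hseg0
  · have hempt : PySem.List.pyRange ((route.length : Int) - 1) 0 (-1) = [] :=
      PySem.List.pyRange_neg_one_eq_nil (by omega)
    simp only [traverse_route, traverse_route_alt, hempt, List.foldl_nil]
  · have hndk : (PySem.Dict.ofList servers).keys.Nodup := PySem.Dict.nodup_keys_ofList servers
    have hseg : ∀ i : Nat, 1 ≤ i → i < route.length →
        pvDie (PySem.Dict.ofList servers) (route.drop i) (servers.length + 1)
          (route.getD (i - 1) "") := by
      intro i h1 h2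
      exact (hseg0 i (List.mem_range.2 h2) h1).1
    have hd0 : ∀ x, (PySem.Dict.ofList ((PySem.Dict.ofList servers).keys.map
        (fun k => (k, (none : Option Int))))).get? x =
          pvRF (PySem.Dict.ofList servers) [] x := by
      intro x
      rw [pvGet?_ofList_map _ hndk (fun _ => (none : Option Int)) x]
      unfold pvRF
      rw [if_neg (List.not_mem_nil)]
    by_cases hlen : route.length ≤ 1
    · have hempt : PySem.List.pyRange ((route.length : Int) - 1) 0 (-1) = [] :=
        PySem.List.pyRange_neg_one_eq_nil (by omega)
      simp only [traverse_route, traverse_route_alt, hempt, List.foldl_nil]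
    · have hcast : (((route.length - 1 : Nat) : Int)) = (route.length : Int) - 1 := by omega
      simp only [traverse_route, traverse_route_alt]
      rw [← hcast]
      exact pvLoop (PySem.Dict.ofList servers) (servers.length + 1) route hseg
        (route.length - 1) (by omega) 1 [] _ _ hd0 (PySem.Dict.nodup_keys_ofList _)
        hd0 (PySem.Dict.nodup_keys_ofList _)
        (fun j hj hjlen => absurd hjlen (by omega))
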